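-- pv_equiv track=rewrite | github.com/Massprod/leetcode-testing | leetcode_problems/p1844_replace_all_digits_with_characters.py | replace_digits
-- ===== SOURCE A (Python) =====
-- def replace_digits(s: str) -> str:
--     # working_sol (35.74%, 59.59%) -> (38ms, 16.49mb)  time: O(s) | space: O(s)
--
--     def shift(char: str, shift: int) -> str:
--         return chr(ord(char) + shift)
--
--     out: list[str] = []
--     for index in range(len(s)):
--         if index % 2:
--             out.append(
--                 shift(s[index - 1], int(s[index]))
--             )
--         else:
--             out.append(s[index])
--     return ''.join(out)
-- ===== SOURCE B (Python) =====
-- def replace_digits(s: str) -> str: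
--     # Recursive decomposition: consume one (letter, digit) pair, recurse on the suffix.
--     if len(s) < 2:
--         return s
--     return s[0] + chr(ord(s[0]) + int(s[1])) + replace_digits(s[2:])
-- ===== Notes on version B (the rewrite author's own statement) =====
-- stated objective: simpler
-- what changed: B replaces A's index loop with parity tests and index-1 back-references by structural recursion on the string: each call consumes one (letter, digit) pair and recurses on the suffix, the base case len(s)<2 returning s handles the odd leftover with no special code.
import Mathlib
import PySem

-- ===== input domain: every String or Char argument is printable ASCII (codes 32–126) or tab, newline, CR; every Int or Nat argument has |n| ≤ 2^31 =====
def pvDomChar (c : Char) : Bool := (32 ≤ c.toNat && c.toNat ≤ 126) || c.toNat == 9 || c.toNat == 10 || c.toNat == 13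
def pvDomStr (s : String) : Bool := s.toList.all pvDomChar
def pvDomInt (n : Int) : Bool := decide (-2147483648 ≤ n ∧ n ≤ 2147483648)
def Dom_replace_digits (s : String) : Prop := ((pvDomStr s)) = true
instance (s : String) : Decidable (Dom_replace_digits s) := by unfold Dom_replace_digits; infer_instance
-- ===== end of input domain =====

-- B replaces A's index-parity loop by structural recursion consuming one (letter, digit) pair per call: same result, simpler decomposition.


-- ===== PORT A =====
-- Python helper shift(char, shift) = chr(ord(char) + shift)
def shiftA (char : Char) (shift : Int) : Char := Char.ofNat ((char.toNat : Int) + shift).toNat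

def replace_digits (s : String) : String :=
  let cs := s.toList
  let out : List Char :=
    (PySem.List.pyRange 0 (cs.length : Int) 1).foldl (fun out index =>
      if PySem.Int.mod index 2 ≠ 0 then
        out ++ [shiftA (PySem.List.pyGetD cs (index - 1) 'a')
                  ((PySem.Int.ofChars? [PySem.List.pyGetD cs index 'a']).getD 0)]
      else
        out ++ [PySem.List.pyGetD cs index 'a']) []
  String.ofList out

-- ===== PORT B =====
-- structural recursion: s[0] + chr(ord(s[0]) + int(s[1])) + replace_digits(s[2:]); len(s) < 2 returns s
def altChars : List Char → List Char
  | a :: b :: t =>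
      a :: Char.ofNat ((a.toNat : Int) + (PySem.Int.ofChars? [b]).getD 0).toNat :: altChars t
  | cs => cs

def replace_digits_alt (s : String) : String := String.ofList (altChars s.toList)

-- ===== PRECONDITION & SPEC =====
-- Pre_ excludes exactly the inputs where Python A raises ValueError: int(s[index]) on a
-- non-digit character at an odd index.
def Pre_replace_digits (s : String) : Prop :=
  ∀ i, i < s.toList.length → i % 2 = 1 → (s.toList.getD i 'a').isDigit
instance (s : String) : Decidable (Pre_replace_digits s) := by
  unfold Pre_replace_digits; infer_instance

def pvWitness_replace_digits : String := "a1b2c"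

def Spec_replace_digits (s : String) (out : String) : Prop := out = replace_digits_alt s
instance (s : String) (out : String) : Decidable (Spec_replace_digits s out) := by
  unfold Spec_replace_digits; infer_instance

-- ===== CLAIM (what is proved, stated in full; the proofs are below) =====
def Claim_equal_replace_digits : Prop :=
  ∀ (s : String), Dom_replace_digits s → Pre_replace_digits s →
    Spec_replace_digits s (replace_digits s)

-- ===== LEMMAS AND PROOFS =====

-- two-at-a-time induction on a list
theorem twoStep {P : List Char → Prop} (h0 : P []) (h1 : ∀ a, P [a])
    (h2 : ∀ a b t, P t → P (a :: b :: t)) : ∀ cs, P cs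
  | [] => h0
  | [a] => h1 a
  | a :: b :: t => h2 a b t (twoStep h0 h1 h2 t)

-- the per-index element A produces (Nat-indexed characterisation)
def elemA (cs : List Char) (k : Nat) : Char :=
  if k % 2 = 1 then
    shiftA (cs.getD (k - 1) 'a') ((PySem.Int.ofChars? [cs.getD k 'a']).getD 0)
  else
    cs.getD k 'a'

theorem mod_cast_nat (n : Nat) : PySem.Int.mod (n : Int) 2 = ((n % 2 : Nat) : Int) := by
  exact_mod_cast PySem.Int.mod_natCast n 2

theorem main_lemma (cs : List Char) :
    (List.range cs.length).map (elemA cs) = altChars cs := by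
  induction cs using twoStep with
  | h0 => simp [altChars]
  | h1 a => simp [altChars, elemA]
  | h2 a b t ih =>
      have hlen : (a :: b :: t).length = 2 + t.length := by simp; omega
      rw [hlen, List.range_add, List.map_append, List.map_map]
      have h2map : (List.range t.length).map (elemA (a :: b :: t) ∘ (fun i => 2 + i))
          = (List.range t.length).map (elemA t) := by
        apply List.map_congr_left
        intro k _
        simp only [Function.comp, elemA]
        have hmod : (2 + k) % 2 = k % 2 := by omega
        rw [hmod]
        by_cases hp : k % 2 = 1
        · rcases k with _ | m
          · omega
          · have e1 : 2 + (m + 1) - 1 = m + 1 + 1 := by omega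
            have e2 : 2 + (m + 1) = m + 1 + 1 + 1 := by omega
            have e3 : m + 1 - 1 = m := by omega
            simp [hp, e1, e2, e3]
        · have e2 : 2 + k = k + 1 + 1 := by omega
          simp [hp, e2]
      rw [h2map, ih]
      have hhead : (List.range 2).map (elemA (a :: b :: t))
          = [a, Char.ofNat ((a.toNat : Int) + (PySem.Int.ofChars? [b]).getD 0).toNat] := by
        simp [List.range_succ, elemA, shiftA]
      rw [hhead]
      simp [altChars]

theorem ports_eq (s : String) : replace_digits s = replace_digits_alt s := by
  unfold replace_digits replace_digits_alt
  have hA : (PySem.List.pyRange 0 (s.toList.length : Int) 1).foldl (fun out index =>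
      if PySem.Int.mod index 2 ≠ 0 then
        out ++ [shiftA (PySem.List.pyGetD s.toList (index - 1) 'a')
                  ((PySem.Int.ofChars? [PySem.List.pyGetD s.toList index 'a']).getD 0)]
      else
        out ++ [PySem.List.pyGetD s.toList index 'a']) []
      = (List.range s.toList.length).map (elemA s.toList) := by
    rw [PySem.List.pyRange_zero_natCast, List.foldl_map]
    have hm := PySem.List.foldl_append_singleton_eq_map (elemA s.toList)
      (List.range s.toList.length) ([] : List Char)
    rw [List.nil_append] at hm
    rw [← hm]
    apply PySem.List.foldl_congr_mem
    intro out k _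
    have hcond : (PySem.Int.mod (k : Int) 2 ≠ 0) ↔ (k % 2 = 1) := by
      rw [mod_cast_nat]; omega
    by_cases hk : k % 2 = 1
    · rw [if_pos (hcond.mpr hk)]
      have e2 : (k : Int) - 1 = ((k - 1 : Nat) : Int) := by omega
      rw [e2]
      simp [elemA, hk]
    · rw [if_neg (fun h => hk (hcond.mp h))]
      simp [elemA, hk]
  simp only [hA, main_lemma]

-- ===== VERDICT (by name: the statement is the Claim_ definition above) =====
theorem replace_digits_spec : Claim_equal_replace_digits := by
  intro s _ _
  unfold Spec_replace_digits
  exact ports_eq s
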